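-- pv_equiv track=rewrite | github.com/vitorlop0/sistema-bancario-pix | main.py | calcular_crc16
-- ===== SOURCE A (Python) =====
-- def calcular_crc16(payload):
--     # Essa é a fórmula matemática padrão exigida pelo Banco Central para o PIX (método criado com ajuda de IA)
--     crc = 0xFFFF
--     for char in payload:
--         crc ^= ord(char) << 8
--         for _ in range(8):
--             if crc & 0x8000:
--                 crc = (crc << 1) ^ 0x1021
--             else:
--                 crc = crc << 1
--             crc &= 0xFFFF
--     return f"{crc:04X}"
-- ===== SOURCE B (Python) =====
-- def calcular_crc16(payload):
--     # Table-free algebraic CRC-16/CCITT: for polynomial 0x1021 the 8-round bit loop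
--     # on byte t collapses to the closed form (u<<12)^^(u<<5)^^u with u = t ^ (t>>4).
--     crc = 0xFFFF
--     for ch in payload:
--         t = ((crc >> 8) ^ ord(ch)) & 0xFF
--         u = t ^ (t >> 4)
--         crc = ((crc << 8) ^ (u << 12) ^ (u << 5) ^ u) & 0xFFFF
--     return format(crc, "04X")
-- ===== Notes on version B (the rewrite author's own statement) =====
-- stated objective: faster
-- what changed: A's per-character 8-iteration polynomial bit loop is replaced by the table-free algebraic CRC-16/CCITT update: per character one closed-form expression crc = ((crc<<8) ^ (u<<12) ^ (u<<5) ^ u) & 0xFFFF with u = t ^ (t>>4), t = ((crc>>8) ^ ord(ch)) & 0xFF, valid because shifting a byte through 8 rounds of the 0x1021 polynomial collapses to that xor form.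
import Mathlib
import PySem

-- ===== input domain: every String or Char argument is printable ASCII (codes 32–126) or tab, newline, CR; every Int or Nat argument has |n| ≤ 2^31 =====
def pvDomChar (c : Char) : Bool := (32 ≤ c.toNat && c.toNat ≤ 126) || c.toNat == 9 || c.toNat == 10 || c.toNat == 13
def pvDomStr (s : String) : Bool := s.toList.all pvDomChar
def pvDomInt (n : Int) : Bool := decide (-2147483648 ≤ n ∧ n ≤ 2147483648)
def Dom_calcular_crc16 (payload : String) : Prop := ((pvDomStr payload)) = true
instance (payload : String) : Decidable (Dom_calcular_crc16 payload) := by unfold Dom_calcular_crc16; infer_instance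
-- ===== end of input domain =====

-- B replaces A's per-character 8-round polynomial bit loop by the table-free algebraic
-- CRC-16/CCITT update (one closed-form xor expression per character); objective: faster (constant factor).

-- ===== PORT A =====
-- A's f"{crc:04X}" (crc is always in [0, 65536))
def pvHexDigit (n : Nat) : Char := if n < 10 then Char.ofNat (48 + n) else Char.ofNat (55 + n)
def pvHex4 (n : Nat) : String :=
  String.mk [pvHexDigit (n / 4096 % 16), pvHexDigit (n / 256 % 16), pvHexDigit (n / 16 % 16), pvHexDigit (n % 16)]

-- one iteration of A's inner `for _ in range(8)` body (both branches end in `crc &= 0xFFFF`)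
def pvBitStep (c : Nat) : Nat :=
  if c &&& 0x8000 ≠ 0 then ((c <<< 1) ^^^ 0x1021) &&& 0xFFFF else (c <<< 1) &&& 0xFFFF

def calcular_crc16 (payload : String) : String :=
  pvHex4 (payload.toList.foldl
    (fun crc ch => (List.range 8).foldl (fun c _ => pvBitStep c) (crc ^^^ (ch.toNat <<< 8))) 0xFFFF)

-- ===== PORT B =====
-- Source B's format(crc, "04X") (crc is always in [0, 65536))
def pvHexB (n : Nat) : String :=
  String.mk (([12, 8, 4, 0] : List Nat).map
    (fun s => "0123456789ABCDEF".toList.getD ((n >>> s) &&& 15) '0'))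

def pvCrcLoopB : List Char → Nat → Nat
  | [], crc => crc
  | ch :: rest, crc =>
      let t := ((crc >>> 8) ^^^ ch.toNat) &&& 0xFF
      let u := t ^^^ (t >>> 4)
      pvCrcLoopB rest (((crc <<< 8) ^^^ (u <<< 12) ^^^ (u <<< 5) ^^^ u) &&& 0xFFFF)

def calcular_crc16_alt (payload : String) : String :=
  pvHexB (pvCrcLoopB payload.toList 0xFFFF)

-- ===== PRECONDITION & SPEC =====
def Spec_calcular_crc16 (payload : String) (out : String) : Prop := out = calcular_crc16_alt payload
instance (payload : String) (out : String) : Decidable (Spec_calcular_crc16 payload out) := by unfold Spec_calcular_crc16; infer_instance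

-- ===== CLAIM =====
def Claim_equal_calcular_crc16 : Prop := ∀ (payload : String), Dom_calcular_crc16 payload → Spec_calcular_crc16 payload (calcular_crc16 payload)

-- ===== LEMMAS AND PROOFS =====

def pvS8 (x : Nat) : Nat :=
  pvBitStep (pvBitStep (pvBitStep (pvBitStep (pvBitStep (pvBitStep (pvBitStep (pvBitStep x)))))))

-- the algebraic per-byte contribution B uses
def pvT (t : Nat) : Nat :=
  ((t ^^^ (t >>> 4)) <<< 12 ^^^ (t ^^^ (t >>> 4)) <<< 5 ^^^ (t ^^^ (t >>> 4))) &&& 65535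

lemma pv_mask16 (x : Nat) : x &&& 65535 = x % 65536 := by
  have h := Nat.and_two_pow_sub_one_eq_mod x 16
  norm_num at h
  exact h

lemma pv_mask8 (x : Nat) : x &&& 255 = x % 256 := by
  have h := Nat.and_two_pow_sub_one_eq_mod x 8
  norm_num at h
  exact h

lemma pv_cond_testBit (z : Nat) : (z &&& 32768 ≠ 0) ↔ z.testBit 15 = true := by
  rw [show (32768 : Nat) = 2 ^ 15 by norm_num, Nat.and_two_pow]
  cases h : z.testBit 15 <;> simp

lemma pv_step_xor (x y : Nat) : pvBitStep (x ^^^ y) = pvBitStep x ^^^ pvBitStep y := by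
  unfold pvBitStep
  rcases Bool.eq_false_or_eq_true (x.testBit 15) with hx | hx <;>
    rcases Bool.eq_false_or_eq_true (y.testBit 15) with hy | hy <;>
    simp only [pv_cond_testBit, Nat.testBit_xor, hx, hy, Bool.xor_true, Bool.xor_false,
      Bool.not_true, Bool.not_false, Bool.false_eq_true,
      if_true, if_false] <;>
    simp only [Nat.shiftLeft_xor_distrib] <;>
    rw [← Nat.and_xor_distrib_right] <;>
    congr 1 <;>
    simp [Nat.xor_assoc, Nat.xor_comm, Nat.xor_left_comm, Nat.xor_self]

lemma pv_fold8 (x : Nat) : (List.range 8).foldl (fun c _ => pvBitStep c) x = pvS8 x := by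
  rw [show List.range 8 = [0, 1, 2, 3, 4, 5, 6, 7] from rfl]
  simp [pvS8]

lemma pv_S8_xor (x y : Nat) : pvS8 (x ^^^ y) = pvS8 x ^^^ pvS8 y := by
  simp [pvS8, pv_step_xor]

lemma pv_step_small (x : Nat) (h : x < 32768) : pvBitStep x = 2 * x := by
  unfold pvBitStep
  rw [if_neg]
  · rw [Nat.shiftLeft_eq, pv_mask16]
    omega
  · intro hc
    have hb : x.testBit 15 = false :=
      Nat.testBit_lt_two_pow (lt_of_lt_of_le h (le_of_eq (by norm_num)))
    rw [pv_cond_testBit] at hc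
    simp [hb] at hc

lemma pv_S8_small (lo : Nat) (h : lo < 256) : pvS8 lo = lo <<< 8 := by
  unfold pvS8
  rw [pv_step_small lo (by omega), pv_step_small (2 * lo) (by omega),
    pv_step_small (2 * (2 * lo)) (by omega), pv_step_small (2 * (2 * (2 * lo))) (by omega),
    pv_step_small (2 * (2 * (2 * (2 * lo)))) (by omega),
    pv_step_small (2 * (2 * (2 * (2 * (2 * lo))))) (by omega),
    pv_step_small (2 * (2 * (2 * (2 * (2 * (2 * lo)))))) (by omega),
    pv_step_small (2 * (2 * (2 * (2 * (2 * (2 * (2 * lo))))))) (by omega),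
    Nat.shiftLeft_eq]
  norm_num
  ring

-- for each byte t, running the 8-round bit loop on t<<8 equals B's closed form
set_option maxRecDepth 100000 in
lemma pv_S8_closed (t : Nat) (h : t < 256) : pvS8 (t <<< 8) = pvT t := by
  have hall : (List.range 256).all (fun t => pvS8 (t <<< 8) == pvT t) = true := by decide
  rw [List.all_eq_true] at hall
  simpa using hall t (List.mem_range.mpr h)

lemma pv_decomp (crc : Nat) : ((crc >>> 8) <<< 8) ^^^ (crc % 256) = crc := by
  apply Nat.eq_of_testBit_eq
  intro i
  rw [show (256 : Nat) = 2 ^ 8 by norm_num]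
  simp only [Nat.testBit_xor, Nat.testBit_shiftLeft, Nat.testBit_shiftRight,
    Nat.testBit_mod_two_pow]
  by_cases hi : 8 ≤ i
  · rw [show 8 + (i - 8) = i by omega]
    simp [hi, show ¬ i < 8 by omega]
  · simp [hi, show i < 8 by omega]

lemma pv_byte_eq (crc b : Nat) (hc : crc < 65536) (hb : b < 256) :
    pvS8 (crc ^^^ (b <<< 8))
      = ((crc <<< 8) ^^^ (((((crc >>> 8) ^^^ b) &&& 255) ^^^ ((((crc >>> 8) ^^^ b) &&& 255) >>> 4)) <<< 12)
          ^^^ (((((crc >>> 8) ^^^ b) &&& 255) ^^^ ((((crc >>> 8) ^^^ b) &&& 255) >>> 4)) <<< 5)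
          ^^^ ((((crc >>> 8) ^^^ b) &&& 255) ^^^ ((((crc >>> 8) ^^^ b) &&& 255) >>> 4))) &&& 65535 := by
  have hxb : (crc >>> 8) ^^^ b < 256 := by
    have hhi : crc >>> 8 < 256 := by
      rw [Nat.shiftRight_eq_div_pow]; norm_num; omega
    have := Nat.xor_lt_two_pow (n := 8)
      (x := crc >>> 8) (y := b) (by norm_num; omega) (by norm_num; omega)
    norm_num at this
    exact this
  have ht : ((crc >>> 8) ^^^ b) &&& 255 = (crc >>> 8) ^^^ b := by
    rw [pv_mask8, Nat.mod_eq_of_lt hxb]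
  have harg : crc ^^^ (b <<< 8) = (((crc >>> 8) ^^^ b) <<< 8) ^^^ (crc % 256) := by
    conv_lhs => rw [← pv_decomp crc]
    rw [Nat.shiftLeft_xor_distrib]
    simp [Nat.xor_assoc, Nat.xor_comm]
  have hsh : crc <<< 8 &&& 65535 = (crc % 256) <<< 8 := by
    rw [pv_mask16, Nat.shiftLeft_eq, Nat.shiftLeft_eq]
    norm_num
    omega
  rw [ht, harg, pv_S8_xor, pv_S8_small (crc % 256) (Nat.mod_lt _ (by norm_num)),
    pv_S8_closed _ hxb]
  rw [show ∀ a e f g : Nat, a ^^^ e ^^^ f ^^^ g = a ^^^ (e ^^^ f ^^^ g) from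
    fun a e f g => by simp [Nat.xor_assoc]]
  rw [Nat.and_xor_distrib_right, hsh]
  unfold pvT
  rw [Nat.xor_comm]

lemma pv_loop_eq (l : List Char) :
    ∀ crc : Nat, crc < 65536 → (∀ c ∈ l, pvDomChar c = true) →
    l.foldl (fun crc ch =>
        (List.range 8).foldl (fun c _ => pvBitStep c) (crc ^^^ (ch.toNat <<< 8))) crc
      = pvCrcLoopB l crc := by
  induction l with
  | nil => intro crc _ _; rfl
  | cons ch t ih =>
    intro crc hc hdom
    have hch : ch.toNat < 256 := by
      have := hdom ch (List.mem_cons_self ..)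
      unfold pvDomChar at this
      simp at this
      omega
    simp only [List.foldl_cons, pvCrcLoopB]
    rw [pv_fold8, pv_byte_eq crc ch.toNat hc hch]
    exact ih _ (lt_of_le_of_lt Nat.and_le_right (by norm_num))
      (fun c hm => hdom c (List.mem_cons_of_mem _ hm))

lemma pvCrcLoopB_lt (l : List Char) : ∀ crc : Nat, crc < 65536 → pvCrcLoopB l crc < 65536 := by
  induction l with
  | nil => intro crc hc; exact hc
  | cons ch t ih =>
    intro crc hc
    exact ih _ (lt_of_le_of_lt Nat.and_le_right (by norm_num))

lemma pv_hex_eq (n : Nat) (h : n < 65536) : pvHex4 n = pvHexB n := by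
  unfold pvHex4 pvHexB
  have m16 : ∀ x : Nat, x &&& 15 = x % 16 := fun x => by
    have h := Nat.and_two_pow_sub_one_eq_mod x 4
    norm_num at h
    exact h
  have hdig : ∀ d : Nat, d < 16 → "0123456789ABCDEF".toList.getD d '0' = pvHexDigit d := by
    decide
  have h12 : n >>> 12 = n / 4096 := by rw [Nat.shiftRight_eq_div_pow]
  have h8 : n >>> 8 = n / 256 := by rw [Nat.shiftRight_eq_div_pow]
  have h4 : n >>> 4 = n / 16 := by rw [Nat.shiftRight_eq_div_pow]
  have h0 : n >>> 0 = n := rfl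
  simp only [List.map, h12, h8, h4, h0, m16]
  rw [hdig _ (Nat.mod_lt _ (by norm_num)), hdig _ (Nat.mod_lt _ (by norm_num)),
    hdig _ (Nat.mod_lt _ (by norm_num)), hdig _ (Nat.mod_lt _ (by norm_num))]

-- ===== VERDICT =====
theorem calcular_crc16_spec : Claim_equal_calcular_crc16 := by
  intro payload hdom
  unfold Spec_calcular_crc16 calcular_crc16 calcular_crc16_alt
  have hall : ∀ c ∈ payload.toList, pvDomChar c = true := by
    unfold Dom_calcular_crc16 pvDomStr at hdom
    simpa [List.all_eq_true] using hdom
  rw [pv_loop_eq payload.toList 0xFFFF (by norm_num) hall,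
    pv_hex_eq _ (pvCrcLoopB_lt payload.toList 0xFFFF (by norm_num))]
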